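-- pv_equiv track=rewrite | github.com/TG-Lim/Algorithm_interview | baekjoon/1891.py | coord_to_quad
-- ===== SOURCE A (Python) =====
-- def coord_to_quad(d: int, x: int, y: int):
--     if d == 0:
--         return ''
--
--     half = 2**(d-1)
--
--     if x >= half and y >= half:
--         return '1' + coord_to_quad(d-1, x-half, y-half)
--
--     elif x < half and y >= half:
--         return '2' + coord_to_quad(d-1, x, y-half)
--
--     elif x < half and y < half:
--         return '3' + coord_to_quad(d-1, x, y)
--     else:
--         return '4' + coord_to_quad(d-1, x-half, y)
-- ===== SOURCE B (Python) =====
-- def coord_to_quad(d: int, x: int, y: int):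
--     res = []
--     for level in reversed(range(d)):
--         half = 1 << level
--         if x >= half:
--             if y >= half:
--                 res.append('1')
--                 x -= half
--                 y -= half
--             else:
--                 res.append('4')
--                 x -= half
--         else:
--             if y >= half:
--                 res.append('2')
--                 y -= half
--             else:
--                 res.append('3')
--     return ''.join(res)
-- ===== Notes on version B (the rewrite author's own statement) =====
-- stated objective: alternative
-- what changed: Replaces the string-concatenating recursion by an iterative loop over levels d-1..0 that accumulates digit characters in a list and joins them once.
import Mathlib
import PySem

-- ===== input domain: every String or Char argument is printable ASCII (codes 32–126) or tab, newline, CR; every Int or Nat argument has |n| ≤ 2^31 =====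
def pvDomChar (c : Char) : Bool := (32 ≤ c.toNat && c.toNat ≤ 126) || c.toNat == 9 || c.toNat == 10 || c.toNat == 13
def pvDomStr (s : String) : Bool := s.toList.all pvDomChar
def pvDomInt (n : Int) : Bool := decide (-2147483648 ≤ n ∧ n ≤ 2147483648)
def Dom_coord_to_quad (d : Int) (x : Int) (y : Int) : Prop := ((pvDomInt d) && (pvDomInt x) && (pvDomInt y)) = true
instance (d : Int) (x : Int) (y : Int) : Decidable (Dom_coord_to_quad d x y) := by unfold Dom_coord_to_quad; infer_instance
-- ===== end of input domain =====

-- B replaces A's string-concatenating recursion by an iterative loop over the levels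
-- d-1 .. 0 that accumulates the digit characters and joins them once (objective: alternative).

-- ===== PORT A =====
-- A's recursion on d, carried out on the character list; fuel = d.toNat (Python diverges
-- for d < 0, which Pre_ excludes). Branch structure and arithmetic follow A exactly.
def coordARec : Nat → Int → Int → List Char
  | 0, _, _ => []
  | n + 1, x, y =>
    let half : Int := 2 ^ n
    if x ≥ half ∧ y ≥ half then '1' :: coordARec n (x - half) (y - half)
    else if x < half ∧ y ≥ half then '2' :: coordARec n x (y - half)
    else if x < half ∧ y < half then '3' :: coordARec n x y
    else '4' :: coordARec n (x - half) y

def coord_to_quad (d : Int) (x : Int) (y : Int) : String :=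
  String.ofList (coordARec d.toNat x y)

-- ===== PORT B =====
-- Source B's loop body: one level, state (x, y, accumulated digits).
def coordBStep (st : Int × Int × List Char) (level : Nat) : Int × Int × List Char :=
  let (x, y, res) := st
  let half : Int := 1 <<< level
  if x ≥ half then
    if y ≥ half then (x - half, y - half, res ++ ['1'])
    else (x - half, y, res ++ ['4'])
  else
    if y ≥ half then (x, y - half, res ++ ['2'])
    else (x, y, res ++ ['3'])

def coord_to_quad_alt (d : Int) (x : Int) (y : Int) : String :=
  String.ofList (((List.range d.toNat).reverse.foldl coordBStep (x, y, [])).2.2)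

-- ===== PRECONDITION & SPEC =====
-- Pre_ excludes d < 0, on which A's recursion never reaches its base case (RecursionError).
def Pre_coord_to_quad (d : Int) (x : Int) (y : Int) : Prop := 0 ≤ d
instance (d : Int) (x : Int) (y : Int) : Decidable (Pre_coord_to_quad d x y) := by
  unfold Pre_coord_to_quad; infer_instance

def pvWitness_coord_to_quad : Int × Int × Int := (3, 5, 2)

def Spec_coord_to_quad (d : Int) (x : Int) (y : Int) (out : String) : Prop := out = coord_to_quad_alt d x y
instance (d : Int) (x : Int) (y : Int) (out : String) : Decidable (Spec_coord_to_quad d x y out) := by unfold Spec_coord_to_quad; infer_instance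

-- ===== CLAIM (what is proved, stated in full; the proofs are below) =====
def Claim_equal_coord_to_quad : Prop := ∀ (d : Int) (x : Int) (y : Int), Dom_coord_to_quad d x y → Pre_coord_to_quad d x y → Spec_coord_to_quad d x y (coord_to_quad d x y)

-- ===== LEMMAS AND PROOFS =====

-- Invariant of B's loop: running the n remaining levels appends A's answer for depth n.
theorem coordB_loop_eq (n : Nat) : ∀ (x y : Int) (acc : List Char),
    ((List.range n).reverse.foldl coordBStep (x, y, acc)).2.2 = acc ++ coordARec n x y := by
  induction n with
  | zero => intro x y acc; simp [coordARec]
  | succ n ih =>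
    intro x y acc
    rw [List.range_succ, List.reverse_append]
    simp only [List.reverse_singleton, List.singleton_append, List.foldl_cons]
    have hhalf : (((1 <<< n : Nat) : Int)) = (2 : Int) ^ n := by
      simp [Nat.shiftLeft_eq]
    simp only [coordBStep, coordARec, hhalf]
    by_cases hx : x ≥ (2 : Int) ^ n <;> by_cases hy : y ≥ (2 : Int) ^ n
    · rw [if_pos hx, if_pos hy, if_pos ⟨hx, hy⟩, ih]
      simp
    · rw [if_pos hx, if_neg hy, if_neg (by tauto), if_neg (by omega),
        if_neg (by omega), ih]
      simp
    · rw [if_neg hx, if_pos hy, if_neg (by tauto), if_pos ⟨by omega, hy⟩, ih]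
      simp
    · rw [if_neg hx, if_neg hy, if_neg (by tauto), if_neg (by tauto),
        if_pos ⟨by omega, by omega⟩, ih]
      simp

-- ===== VERDICT (by name: the statement is the Claim_ definition above) =====
theorem coord_to_quad_spec : Claim_equal_coord_to_quad := by
  intro d x y _ _
  unfold Spec_coord_to_quad coord_to_quad coord_to_quad_alt
  rw [coordB_loop_eq]
  simp
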